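-- pv_equiv track=rewrite | github.com/EBIvariation/convertGVFtoVCF | convert_gvf_to_vcf/convertGVFtoVCF.py | generate_custom_structured_metainformation_line
-- ===== SOURCE A (Python) =====
-- def generate_custom_structured_metainformation_line(vcf_key, vcf_key_id, vcf_key_number, vcf_key_type, vcf_key_description,
--                                                     optional_extra_fields=None):
--     """ Generates a custom structured meta-information line for INFO/FILTER/FORMAT/ALT
--     :param vcf_key: required field INFO, FILTER, FORMAT, ALT
--     :param vcf_key_id: required field for structured lines ID
--     :param vcf_key_number: The number of values that can be included or special character: A or R or G or .
--     :param vcf_key_type: Values are Integer, Float, Character, String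
--     :param vcf_key_description: Description
--     :param optional_extra_fields: an optional field, dictionary of custom fields and their values
--     :return: custom_structured_string
--     """
--     extra_keys_kv_lines = []
--     if optional_extra_fields:
--         for extra_field in optional_extra_fields:
--             kv_line = "," + extra_field + "=" + '"' + optional_extra_fields[extra_field] + '"'
--             extra_keys_kv_lines.append(kv_line)
--     vcf_key_extra_keys = ''.join(extra_keys_kv_lines)
--     custom_structured_string = f'##{vcf_key}=<ID="{vcf_key_id}",Number="{vcf_key_number}",Type="{vcf_key_type}",Description="{vcf_key_description}"{vcf_key_extra_keys}>'
--     return custom_structured_string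
-- ===== SOURCE B (Python) =====
-- def generate_custom_structured_metainformation_line(vcf_key, vcf_key_id, vcf_key_number, vcf_key_type, vcf_key_description,
--                                                     optional_extra_fields=None):
--     """Uniform rendering: required and optional fields are one ordered (key, value) list, joined with ','."""
--     fields = [("ID", vcf_key_id), ("Number", vcf_key_number), ("Type", vcf_key_type),
--               ("Description", vcf_key_description)]
--     fields += (optional_extra_fields or {}).items()
--     body = ",".join('{}="{}"'.format(k, v) for k, v in fields)
--     return "##{}=<{}>".format(vcf_key, body)
-- ===== Notes on version B (the rewrite author's own statement) =====
-- stated objective: simpler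
-- what changed: B builds one ordered (key,value) list containing the four required fields and the optional extras, renders every pair uniformly as k="v" and joins with ',', instead of A's hardcoded four-field f-string plus a separate loop that prepends ',' to each extra field.
import Mathlib
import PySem

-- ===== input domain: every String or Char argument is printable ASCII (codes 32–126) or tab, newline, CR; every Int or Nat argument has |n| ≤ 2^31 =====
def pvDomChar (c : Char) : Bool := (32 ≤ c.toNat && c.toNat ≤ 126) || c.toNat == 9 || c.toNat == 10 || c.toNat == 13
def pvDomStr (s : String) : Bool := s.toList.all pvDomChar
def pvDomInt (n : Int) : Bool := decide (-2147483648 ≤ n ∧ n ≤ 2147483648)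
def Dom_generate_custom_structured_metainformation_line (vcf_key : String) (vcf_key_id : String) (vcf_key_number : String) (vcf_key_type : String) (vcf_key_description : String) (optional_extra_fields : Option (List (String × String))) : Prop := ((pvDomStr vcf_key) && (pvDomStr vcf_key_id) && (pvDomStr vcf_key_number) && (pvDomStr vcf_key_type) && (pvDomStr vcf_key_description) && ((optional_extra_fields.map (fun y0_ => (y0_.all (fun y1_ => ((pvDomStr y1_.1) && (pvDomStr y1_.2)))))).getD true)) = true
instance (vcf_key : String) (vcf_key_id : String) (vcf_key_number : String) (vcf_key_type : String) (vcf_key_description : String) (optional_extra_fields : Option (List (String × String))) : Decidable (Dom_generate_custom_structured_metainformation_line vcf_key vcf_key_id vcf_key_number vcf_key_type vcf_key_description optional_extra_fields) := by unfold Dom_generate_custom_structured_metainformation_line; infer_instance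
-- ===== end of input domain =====

-- B replaces A's hardcoded four-field f-string plus a separate comma-prepending loop by one uniform
-- (key, value) list rendered pairwise and joined with ',' (objective: simpler). Same return value.

-- ===== PORT A =====
-- A receives `optional_extra_fields` as a Python dict (or None); the assoc list is normalised with
-- PySem.Dict.ofList, which is exactly Python's dict construction (insertion order, overwrite in place).
def generate_custom_structured_metainformation_line (vcf_key : String) (vcf_key_id : String) (vcf_key_number : String) (vcf_key_type : String) (vcf_key_description : String) (optional_extra_fields : Option (List (String × String))) : String :=
  let extra_keys_kv_lines : List String :=
    match optional_extra_fields with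
    | none => []                                 -- `if optional_extra_fields:` — None is falsy
    | some l =>
      let d := PySem.Dict.ofList l               -- the dict the Python function received
      if d.size = 0 then []                      -- `if optional_extra_fields:` — empty dict is falsy
      else
        -- `for extra_field in optional_extra_fields:` iterates the keys in insertion order;
        -- `optional_extra_fields[extra_field]` never raises since extra_field ∈ d.keys (getD default unreachable)
        d.keys.foldl (fun acc k => acc ++ ["," ++ k ++ "=\"" ++ d.getD k "" ++ "\""]) []
  let vcf_key_extra_keys := PySem.Str.join "" extra_keys_kv_lines
  "##" ++ vcf_key ++ "=<ID=\"" ++ vcf_key_id ++ "\",Number=\"" ++ vcf_key_number ++ "\",Type=\"" ++ vcf_key_type ++ "\",Description=\"" ++ vcf_key_description ++ "\"" ++ vcf_key_extra_keys ++ ">"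

-- ===== PORT B =====
def generate_custom_structured_metainformation_line_alt (vcf_key : String) (vcf_key_id : String) (vcf_key_number : String) (vcf_key_type : String) (vcf_key_description : String) (optional_extra_fields : Option (List (String × String))) : String :=
  -- `(optional_extra_fields or {}).items()`: the dict's pairs in insertion order
  let fields : List (String × String) :=
    [("ID", vcf_key_id), ("Number", vcf_key_number), ("Type", vcf_key_type), ("Description", vcf_key_description)]
      ++ (PySem.Dict.ofList (optional_extra_fields.getD [])).items
  let body := PySem.Str.join "," (fields.map (fun p => p.1 ++ "=\"" ++ p.2 ++ "\""))
  "##" ++ vcf_key ++ "=<" ++ body ++ ">"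

-- ===== PRECONDITION & SPEC =====
def Spec_generate_custom_structured_metainformation_line (vcf_key : String) (vcf_key_id : String) (vcf_key_number : String) (vcf_key_type : String) (vcf_key_description : String) (optional_extra_fields : Option (List (String × String))) (out : String) : Prop := out = generate_custom_structured_metainformation_line_alt vcf_key vcf_key_id vcf_key_number vcf_key_type vcf_key_description optional_extra_fields
instance (vcf_key : String) (vcf_key_id : String) (vcf_key_number : String) (vcf_key_type : String) (vcf_key_description : String) (optional_extra_fields : Option (List (String × String))) (out : String) : Decidable (Spec_generate_custom_structured_metainformation_line vcf_key vcf_key_id vcf_key_number vcf_key_type vcf_key_description optional_extra_fields out) := by unfold Spec_generate_custom_structured_metainformation_line; infer_instance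

-- ===== CLAIM (what is proved, stated in full; the proofs are below) =====
def Claim_equal_generate_custom_structured_metainformation_line : Prop := ∀ (vcf_key : String) (vcf_key_id : String) (vcf_key_number : String) (vcf_key_type : String) (vcf_key_description : String) (optional_extra_fields : Option (List (String × String))), Dom_generate_custom_structured_metainformation_line vcf_key vcf_key_id vcf_key_number vcf_key_type vcf_key_description optional_extra_fields → Spec_generate_custom_structured_metainformation_line vcf_key vcf_key_id vcf_key_number vcf_key_type vcf_key_description optional_extra_fields (generate_custom_structured_metainformation_line vcf_key vcf_key_id vcf_key_number vcf_key_type vcf_key_description optional_extra_fields)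

-- ===== LEMMAS AND PROOFS =====

-- join "," on two-or-more parts peels its head (comma between head and tail)
theorem pv_join_comma_cons_cons (x e : String) (es : List String) :
    PySem.Str.join "," (x :: e :: es) = x ++ ("," ++ PySem.Str.join "," (e :: es)) := by
  simp only [PySem.Str.join, String.reduceToList, List.map_cons, PySem.Chars.join_cons_cons,
    List.append_assoc, String.ofList_append, String.ofList_toList]

-- join "" is plain concatenation: it peels its head
theorem pv_join_empty_cons (y : String) (l : List String) :
    PySem.Str.join "" (y :: l) = y ++ PySem.Str.join "" l := by
  cases l with
  | nil => simp [PySem.Str.join, PySem.Chars.join_singleton, PySem.Chars.join_nil]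
  | cons f fs =>
    simp only [PySem.Str.join, String.reduceToList, List.map_cons, PySem.Chars.join_cons_cons,
      List.append_assoc, String.ofList_append, String.ofList_toList]
    simp

-- comma-join of a nonempty list = head ++ concatenation of comma-prefixed tail
theorem pv_join_comma_eq (x : String) (es : List String) :
    PySem.Str.join "," (x :: es) = x ++ PySem.Str.join "" (es.map (fun e => "," ++ e)) := by
  induction es generalizing x with
  | nil => simp [PySem.Str.join, PySem.Chars.join_singleton, PySem.Chars.join_nil]
  | cons e es ih =>
    rw [pv_join_comma_cons_cons, ih, List.map_cons, pv_join_empty_cons]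
    simp [String.append_assoc]

-- the two renderings of the full line agree for ANY list of extra pairs
theorem pv_core (k i n t dsc : String) (es : List (String × String)) :
    "##" ++ k ++ "=<ID=\"" ++ i ++ "\",Number=\"" ++ n ++ "\",Type=\"" ++ t
      ++ "\",Description=\"" ++ dsc ++ "\""
      ++ PySem.Str.join "" (es.map (fun p => "," ++ p.1 ++ "=\"" ++ p.2 ++ "\"")) ++ ">"
    = "##" ++ k ++ "=<"
      ++ PySem.Str.join ","
          ((([("ID", i), ("Number", n), ("Type", t), ("Description", dsc)] ++ es).map
            (fun p => p.1 ++ "=\"" ++ p.2 ++ "\"")))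
      ++ ">" := by
  simp only [List.cons_append, List.map_cons]
  rw [pv_join_comma_eq, List.map_cons, List.map_cons, List.map_cons,
    pv_join_empty_cons, pv_join_empty_cons, pv_join_empty_cons]
  have hmap : es.map ((fun e => "," ++ e) ∘ fun p : String × String => p.1 ++ "=\"" ++ p.2 ++ "\"")
      = es.map (fun p => "," ++ p.1 ++ "=\"" ++ p.2 ++ "\"") := by
    apply List.map_congr_left
    intro p _
    simp [String.append_assoc]
  rw [List.nil_append, List.map_map, hmap]
  rw [← String.toList_inj]
  simp [String.toList_append]

-- A's extras loop is a map over the dict's items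
theorem pv_extras (d : PySem.Dict String String) (h : d.keys.Nodup) :
    d.keys.foldl (fun acc k => acc ++ ["," ++ k ++ "=\"" ++ d.getD k "" ++ "\""]) []
      = d.items.map (fun p => "," ++ p.1 ++ "=\"" ++ p.2 ++ "\"") := by
  rw [PySem.List.foldl_append_singleton_eq_map, PySem.Dict.items_eq_map_keys d h "", List.map_map]
  rfl

-- ===== VERDICT (by name: the statement is the Claim_ definition above) =====
theorem generate_custom_structured_metainformation_line_spec : Claim_equal_generate_custom_structured_metainformation_line := by
  intro k i n t dsc o _
  unfold Spec_generate_custom_structured_metainformation_line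
    generate_custom_structured_metainformation_line
    generate_custom_structured_metainformation_line_alt
  cases o with
  | none =>
    simpa using pv_core k i n t dsc []
  | some l =>
    have hnd := PySem.Dict.nodup_keys_ofList (κ := String) (ν := String) l
    by_cases h : (PySem.Dict.ofList l).size = 0
    · have hit : (PySem.Dict.ofList l).items = [] := by
        have := h
        unfold PySem.Dict.size at this
        exact List.eq_nil_of_length_eq_zero this
      simp only [h, if_pos, Option.getD_some, hit]
      simpa using pv_core k i n t dsc []
    · simp only [h, Option.getD_some, pv_extras _ hnd]
      exact pv_core k i n t dsc (PySem.Dict.ofList l).items
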